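-- pv_equiv track=rewrite | github.com/deulf/Divided-Data-Cypher-Datenspeicherung-auf-DNA | utilities.py | wiederholungEntfernung
-- ===== SOURCE A (Python) =====
-- def wiederholungEntfernung(dna):  # Entfernt Sequenzen von über 4 Nukleotiden hintereinander
--     dna2 = []
--     for strand in dna:
--         strand = strand.replace("AAAA", "AATA")
--         strand = strand.replace("TTTT", "TTAT")
--         strand = strand.replace("CCCC", "CCGC")
--         strand = strand.replace("GGGG", "GGCG")
--         dna2.append(strand)
--     return dna2
-- ===== SOURCE B (Python) =====
-- def wiederholungEntfernung(dna):  # single left-to-right scan per strand with a lookup table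
--     table = {'A': "AATA", 'T': "TTAT", 'C': "CCGC", 'G': "GGCG"}
--     dna2 = []
--     for strand in dna:
--         pieces = []
--         i, n = 0, len(strand)
--         while i < n:
--             c = strand[i]
--             if c in table and strand[i:i + 4] == c * 4:
--                 pieces.append(table[c])
--                 i += 4
--             else:
--                 pieces.append(c)
--                 i += 1
--         dna2.append("".join(pieces))
--     return dna2
-- ===== Notes on version B (the rewrite author's own statement) =====
-- stated objective: alternative
-- what changed: Replaces the four chained full-string str.replace passes by one left-to-right scan that checks each position for a 4-nucleotide run and substitutes via a lookup table, building each output strand in a single pass.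
import Mathlib
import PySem

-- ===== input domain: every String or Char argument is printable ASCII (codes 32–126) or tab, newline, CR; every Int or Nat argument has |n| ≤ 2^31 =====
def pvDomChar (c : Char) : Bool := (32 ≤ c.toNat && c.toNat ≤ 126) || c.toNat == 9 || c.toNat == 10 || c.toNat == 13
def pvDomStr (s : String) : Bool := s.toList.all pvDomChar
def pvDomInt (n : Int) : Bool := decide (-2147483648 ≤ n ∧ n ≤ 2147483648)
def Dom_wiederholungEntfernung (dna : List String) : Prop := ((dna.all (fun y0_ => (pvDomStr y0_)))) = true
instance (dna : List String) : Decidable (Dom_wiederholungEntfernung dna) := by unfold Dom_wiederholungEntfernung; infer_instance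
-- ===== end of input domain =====

-- B replaces A's four chained full-string replace passes by one left-to-right scan
-- with a lookup table (objective: alternative, same cost).

-- ===== PORT A =====
def wiederholungEntfernung (dna : List String) : List String :=
  dna.foldl (fun dna2 strand =>
    let s1 := PySem.Str.replace strand "AAAA" "AATA"
    let s2 := PySem.Str.replace s1 "TTTT" "TTAT"
    let s3 := PySem.Str.replace s2 "CCCC" "CCGC"
    let s4 := PySem.Str.replace s3 "GGGG" "GGCG"
    dna2 ++ [s4]) []

-- ===== PORT B =====
-- table[c] of Source B
def pvTable (c : Char) : List Char :=
  if c = 'A' then "AATA".toList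
  else if c = 'T' then "TTAT".toList
  else if c = 'C' then "CCGC".toList
  else "GGCG".toList

-- the while-loop of Source B as the obvious structural recursion on the remaining characters
def pvScan : List Char → List Char
  | [] => []
  | a :: b :: d :: e :: rest' =>
    if (a = 'A' ∨ a = 'T' ∨ a = 'C' ∨ a = 'G') ∧ b = a ∧ d = a ∧ e = a
    then pvTable a ++ pvScan rest'
    else a :: pvScan (b :: d :: e :: rest')
  | a :: rest => a :: pvScan rest

def wiederholungEntfernung_alt (dna : List String) : List String :=
  dna.map (fun strand => String.ofList (pvScan strand.toList))

-- ===== PRECONDITION & SPEC =====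
def Spec_wiederholungEntfernung (dna : List String) (out : List String) : Prop := out = wiederholungEntfernung_alt dna
instance (dna : List String) (out : List String) : Decidable (Spec_wiederholungEntfernung dna out) := by unfold Spec_wiederholungEntfernung; infer_instance

-- ===== CLAIM (what is proved, stated in full; the proofs are below) =====
def Claim_equal_wiederholungEntfernung : Prop := ∀ (dna : List String), Dom_wiederholungEntfernung dna → Spec_wiederholungEntfernung dna (wiederholungEntfernung dna)

-- ===== LEMMAS AND PROOFS =====

-- proof-side model of one Python replace pass with pattern [c,c,c,c]
def pvRep4 (c : Char) (new : List Char) : List Char → List Char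
  | [] => []
  | a :: b :: d :: e :: rest' =>
    if a = c ∧ b = c ∧ d = c ∧ e = c then new ++ pvRep4 c new rest'
    else a :: pvRep4 c new (b :: d :: e :: rest')
  | a :: rest => a :: pvRep4 c new rest

theorem pvRep4_quad (c : Char) (new l) :
    pvRep4 c new (c :: c :: c :: c :: l) = new ++ pvRep4 c new l := by
  simp [pvRep4]

theorem pvRep4_cons_ne (c : Char) (new : List Char) {a : Char} (h : a ≠ c) (l : List Char) :
    pvRep4 c new (a :: l) = a :: pvRep4 c new l := by
  match l with
  | [] => simp [pvRep4]
  | [b] => simp [pvRep4]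
  | [b, d] => simp [pvRep4]
  | b :: d :: e :: l' => simp [pvRep4, h]

theorem pvRep4_cons2_ne (c : Char) (new : List Char) (a : Char) {b : Char} (h : b ≠ c) (l : List Char) :
    pvRep4 c new (a :: b :: l) = a :: pvRep4 c new (b :: l) := by
  match l with
  | [] => simp [pvRep4]
  | [d] => simp [pvRep4]
  | d :: e :: l' => simp [pvRep4, h]

theorem pvRep4_cons3_ne (c : Char) (new : List Char) (a b : Char) {d : Char} (h : d ≠ c) (l : List Char) :
    pvRep4 c new (a :: b :: d :: l) = a :: pvRep4 c new (b :: d :: l) := by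
  match l with
  | [] => simp [pvRep4]
  | e :: l' => simp [pvRep4, h]

theorem pvRep4_cons4_ne (c : Char) (new : List Char) (a b d : Char) {e : Char} (h : e ≠ c) (l : List Char) :
    pvRep4 c new (a :: b :: d :: e :: l) = a :: pvRep4 c new (b :: d :: e :: l) := by
  simp [pvRep4, h]

-- the first character survives a pass whose replacement starts with the pattern letter
theorem pvRep4_head (c : Char) {new nt : List Char} (hn : new = c :: nt)
    (a : Char) (l : List Char) : ∃ t, pvRep4 c new (a :: l) = a :: t := by
  by_cases hac : a = c
  · subst hac
    match l with
    | [] => exact ⟨[], by simp [pvRep4]⟩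
    | [b] => exact ⟨[b], by simp [pvRep4]⟩
    | [b, d] => exact ⟨[b, d], by simp [pvRep4]⟩
    | b :: d :: e :: l' =>
      by_cases h : b = a ∧ d = a ∧ e = a
      · refine ⟨nt ++ pvRep4 a new l', ?_⟩
        rw [show (a :: b :: d :: e :: l') = (a :: a :: a :: a :: l') by
              rw [h.1, h.2.1, h.2.2],
          pvRep4_quad, hn]; rfl
      · refine ⟨pvRep4 a new (b :: d :: e :: l'), ?_⟩
        simp only [pvRep4]
        rw [if_neg (by tauto)]
  · exact ⟨_, pvRep4_cons_ne c new hac l⟩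

theorem pvRep4_break (c : Char) (new : List Char) (a : Char) {b d e : Char}
    (h : ¬(b = c ∧ d = c ∧ e = c)) (l : List Char) :
    pvRep4 c new (a :: b :: d :: e :: l) = a :: pvRep4 c new (b :: d :: e :: l) := by
  by_cases hb : b = c
  · by_cases hd : d = c
    · exact pvRep4_cons4_ne c new a b d (by tauto) l
    · exact pvRep4_cons3_ne c new a b hd (e :: l)
  · exact pvRep4_cons2_ne c new a hb (d :: e :: l)

-- pvRep4 is what Python's str.replace computes for a pattern [c,c,c,c]
theorem go_eq_pvRep4 (c : Char) (new : List Char) :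
    ∀ (fuel : Nat) (l acc : List Char), l.length ≤ fuel →
      PySem.Chars.replace.go [c, c, c, c] new fuel l acc = acc.reverse ++ pvRep4 c new l := by
  intro fuel
  induction fuel with
  | zero =>
    intro l acc h
    have hl : l = [] := List.eq_nil_of_length_eq_zero (Nat.le_zero.mp h)
    subst hl
    simp [PySem.Chars.replace.go, pvRep4]
  | succ fuel ih =>
    intro l acc h
    match l with
    | [] => simp [PySem.Chars.replace.go, pvRep4]
    | a :: t =>
      rw [PySem.Chars.replace.go]
      by_cases hp : [c, c, c, c].isPrefixOf (a :: t) = true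
      · rw [if_pos hp]
        have hpre : [c, c, c, c] <+: (a :: t) := List.isPrefixOf_iff_prefix.mp hp
        obtain ⟨r, hr⟩ := hpre
        have hshape : a :: t = c :: c :: c :: c :: r := by
          simpa using hr.symm
        rw [hshape]
        have hlen : r.length ≤ fuel := by
          have h1 : t.length = r.length + 3 := by
            have := congrArg List.length hshape; simpa using this
          have h2 : t.length + 1 ≤ fuel + 1 := by simpa using h
          omega
        rw [show List.drop ([c,c,c,c] : List Char).length (c :: c :: c :: c :: r) = r by simp]
        rw [ih r (new.reverse ++ acc) hlen, pvRep4_quad]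
        simp
      · rw [if_neg hp]
        rw [ih t (a :: acc) (by simpa using Nat.le_of_succ_le_succ h)]
        have hstep : pvRep4 c new (a :: t) = a :: pvRep4 c new t := by
          match t with
          | [] => simp [pvRep4]
          | [b] => simp [pvRep4]
          | [b, d] => simp [pvRep4]
          | b :: d :: e :: l' =>
            have hno : ¬(a = c ∧ b = c ∧ d = c ∧ e = c) := by
              intro ⟨h1, h2, h3, h4⟩
              subst h1; subst h2; subst h3; subst h4
              exact hp (List.isPrefixOf_iff_prefix.mpr ⟨l', rfl⟩)
            by_cases hac : a = c
            · exact pvRep4_break c new a (by tauto) l'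
            · exact pvRep4_cons_ne c new hac _
        rw [hstep]; simp

theorem replace_eq_pvRep4 (c : Char) (new l : List Char) :
    PySem.Chars.replace l [c, c, c, c] new = pvRep4 c new l := by
  rw [PySem.Chars.replace]
  rw [if_neg (by simp)]
  simpa using go_eq_pvRep4 c new l.length l [] le_rfl

-- the four passes, innermost (AAAA) first, and their compositions
def pvFA (l : List Char) : List Char := pvRep4 'A' "AATA".toList l
def pvFTA (l : List Char) : List Char := pvRep4 'T' "TTAT".toList (pvFA l)
def pvFCTA (l : List Char) : List Char := pvRep4 'C' "CCGC".toList (pvFTA l)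
def pvComp (l : List Char) : List Char := pvRep4 'G' "GGCG".toList (pvFCTA l)

theorem pvFA_head (x : Char) (l : List Char) : ∃ t, pvFA (x :: l) = x :: t :=
  pvRep4_head 'A' (by decide : ("AATA".toList : List Char) = 'A' :: "ATA".toList) x l

theorem pvFTA_head (x : Char) (l : List Char) : ∃ t, pvFTA (x :: l) = x :: t := by
  obtain ⟨t, ht⟩ := pvFA_head x l
  unfold pvFTA
  rw [ht]
  exact pvRep4_head 'T' (by decide : ("TTAT".toList : List Char) = 'T' :: "TAT".toList) x t

theorem pvFCTA_head (x : Char) (l : List Char) : ∃ t, pvFCTA (x :: l) = x :: t := by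
  obtain ⟨t, ht⟩ := pvFTA_head x l
  unfold pvFCTA
  rw [ht]
  exact pvRep4_head 'C' (by decide : ("CCGC".toList : List Char) = 'C' :: "CGC".toList) x t

theorem pvFA_pass {x : Char} (h : x ≠ 'A') (l : List Char) : pvFA (x :: l) = x :: pvFA l :=
  pvRep4_cons_ne _ _ h l

theorem pvFTA_pass {x : Char} (h1 : x ≠ 'A') (h2 : x ≠ 'T') (l : List Char) :
    pvFTA (x :: l) = x :: pvFTA l := by
  unfold pvFTA
  rw [pvFA_pass h1, pvRep4_cons_ne _ _ h2]

theorem pvFCTA_pass {x : Char} (h1 : x ≠ 'A') (h2 : x ≠ 'T') (h3 : x ≠ 'C') (l : List Char) :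
    pvFCTA (x :: l) = x :: pvFCTA l := by
  unfold pvFCTA
  rw [pvFTA_pass h1 h2, pvRep4_cons_ne _ _ h3]

theorem pvComp_pass {x : Char} (h1 : x ≠ 'A') (h2 : x ≠ 'T') (h3 : x ≠ 'C') (h4 : x ≠ 'G')
    (l : List Char) : pvComp (x :: l) = x :: pvComp l := by
  unfold pvComp
  rw [pvFCTA_pass h1 h2 h3, pvRep4_cons_ne _ _ h4]

-- a blocked T at the head of the T-pass input stays in place
theorem pvT_break {b d e : Char} (h : ¬(b = 'T' ∧ d = 'T' ∧ e = 'T')) (r : List Char) :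
    pvRep4 'T' "TTAT".toList ('T' :: pvFA (b :: d :: e :: r))
      = 'T' :: pvRep4 'T' "TTAT".toList (pvFA (b :: d :: e :: r)) := by
  by_cases hb : b = 'T'
  · subst hb
    rw [pvFA_pass (by decide)]
    by_cases hd : d = 'T'
    · subst hd
      have he : e ≠ 'T' := by tauto
      rw [pvFA_pass (by decide)]
      obtain ⟨t, ht⟩ := pvFA_head e r
      rw [ht]
      exact pvRep4_cons4_ne _ _ _ _ _ he _
    · obtain ⟨t, ht⟩ := pvFA_head d (e :: r)
      rw [ht]
      exact pvRep4_cons3_ne _ _ _ _ hd _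
  · obtain ⟨t, ht⟩ := pvFA_head b (d :: e :: r)
    rw [ht]
    exact pvRep4_cons2_ne _ _ _ hb _

theorem pvC_break {b d e : Char} (h : ¬(b = 'C' ∧ d = 'C' ∧ e = 'C')) (r : List Char) :
    pvRep4 'C' "CCGC".toList ('C' :: pvFTA (b :: d :: e :: r))
      = 'C' :: pvRep4 'C' "CCGC".toList (pvFTA (b :: d :: e :: r)) := by
  by_cases hb : b = 'C'
  · subst hb
    rw [pvFTA_pass (by decide) (by decide)]
    by_cases hd : d = 'C'
    · subst hd
      have he : e ≠ 'C' := by tauto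
      rw [pvFTA_pass (by decide) (by decide)]
      obtain ⟨t, ht⟩ := pvFTA_head e r
      rw [ht]
      exact pvRep4_cons4_ne _ _ _ _ _ he _
    · obtain ⟨t, ht⟩ := pvFTA_head d (e :: r)
      rw [ht]
      exact pvRep4_cons3_ne _ _ _ _ hd _
  · obtain ⟨t, ht⟩ := pvFTA_head b (d :: e :: r)
    rw [ht]
    exact pvRep4_cons2_ne _ _ _ hb _

theorem pvG_break {b d e : Char} (h : ¬(b = 'G' ∧ d = 'G' ∧ e = 'G')) (r : List Char) :
    pvRep4 'G' "GGCG".toList ('G' :: pvFCTA (b :: d :: e :: r))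
      = 'G' :: pvRep4 'G' "GGCG".toList (pvFCTA (b :: d :: e :: r)) := by
  by_cases hb : b = 'G'
  · subst hb
    rw [pvFCTA_pass (by decide) (by decide) (by decide)]
    by_cases hd : d = 'G'
    · subst hd
      have he : e ≠ 'G' := by tauto
      rw [pvFCTA_pass (by decide) (by decide) (by decide)]
      obtain ⟨t, ht⟩ := pvFCTA_head e r
      rw [ht]
      exact pvRep4_cons4_ne _ _ _ _ _ he _
    · obtain ⟨t, ht⟩ := pvFCTA_head d (e :: r)
      rw [ht]
      exact pvRep4_cons3_ne _ _ _ _ hd _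
  · obtain ⟨t, ht⟩ := pvFCTA_head b (d :: e :: r)
    rw [ht]
    exact pvRep4_cons2_ne _ _ _ hb _

theorem pvRep4_short (c : Char) (new : List Char) {l : List Char} (h : l.length ≤ 3) :
    pvRep4 c new l = l := by
  match l with
  | [] => simp [pvRep4]
  | [a] => simp [pvRep4]
  | [a, b] => simp [pvRep4]
  | [a, b, d] => simp [pvRep4]
  | a :: b :: d :: e :: l' => exact absurd h (by simp)

theorem pvComp_short {l : List Char} (h : l.length ≤ 3) : pvComp l = l := by
  unfold pvComp pvFCTA pvFTA pvFA
  rw [pvRep4_short _ _ h, pvRep4_short _ _ h, pvRep4_short _ _ h, pvRep4_short _ _ h]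

theorem pvScan_short {l : List Char} (h : l.length ≤ 3) : pvScan l = l := by
  match l with
  | [] => simp [pvScan]
  | [a] => simp [pvScan]
  | [a, b] => simp [pvScan]
  | [a, b, d] => simp [pvScan]
  | a :: b :: d :: e :: l' => exact absurd h (by simp)

theorem pvComp_eq_pvScan : ∀ (n : Nat) (cs : List Char), cs.length ≤ n → pvComp cs = pvScan cs := by
  intro n
  induction n with
  | zero =>
    intro cs h
    have hl : cs = [] := List.eq_nil_of_length_eq_zero (Nat.le_zero.mp h)
    subst hl
    rw [pvComp_short (by simp), pvScan_short (by simp)]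
  | succ n ih =>
    intro cs h
    match cs with
    | [] => rw [pvComp_short (by simp), pvScan_short (by simp)]
    | [a] => rw [pvComp_short (by simp), pvScan_short (by simp)]
    | [a, b] => rw [pvComp_short (by simp), pvScan_short (by simp)]
    | [a, b, d] => rw [pvComp_short (by simp), pvScan_short (by simp)]
    | a :: b :: d :: e :: rest' =>
      have hlen4 : rest'.length ≤ n := by simp at h; omega
      have hlen1 : (b :: d :: e :: rest').length ≤ n := by simp at h ⊢; omega
      by_cases hc : (a = 'A' ∨ a = 'T' ∨ a = 'C' ∨ a = 'G') ∧ b = a ∧ d = a ∧ e = a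
      · obtain ⟨hm, hb, hd, he⟩ := hc
        have hl : (a :: b :: d :: e :: rest') = (a :: a :: a :: a :: rest') := by
          rw [hb, hd, he]
        rw [hl]
        rw [show pvScan (a :: a :: a :: a :: rest') = pvTable a ++ pvScan rest' by
          simp only [pvScan]; rw [if_pos ⟨hm, trivial, trivial, trivial⟩]]
        rw [← ih rest' hlen4]
        rcases hm with h1 | h1 | h1 | h1 <;> subst h1
        · -- AAAA → AATA; A,A,T,A pass through the T, C, G passes
          unfold pvComp pvFCTA pvFTA pvFA
          rw [pvRep4_quad]
          rw [show ("AATA".toList ++ pvRep4 'A' "AATA".toList rest')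
                = 'A'::'A'::'T'::'A':: pvRep4 'A' "AATA".toList rest' from rfl]
          rw [pvRep4_cons_ne 'T' _ (by decide), pvRep4_cons_ne 'T' _ (by decide),
            pvRep4_cons2_ne 'T' _ _ (by decide), pvRep4_cons_ne 'T' _ (by decide)]
          rw [pvRep4_cons_ne 'C' _ (by decide), pvRep4_cons_ne 'C' _ (by decide),
            pvRep4_cons_ne 'C' _ (by decide), pvRep4_cons_ne 'C' _ (by decide)]
          rw [pvRep4_cons_ne 'G' _ (by decide), pvRep4_cons_ne 'G' _ (by decide),
            pvRep4_cons_ne 'G' _ (by decide), pvRep4_cons_ne 'G' _ (by decide)]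
          rfl
        · -- TTTT: untouched by the A pass, replaced by TTAT, passes C, G
          unfold pvComp pvFCTA pvFTA pvFA
          rw [pvRep4_cons_ne 'A' _ (by decide), pvRep4_cons_ne 'A' _ (by decide),
            pvRep4_cons_ne 'A' _ (by decide), pvRep4_cons_ne 'A' _ (by decide)]
          rw [pvRep4_quad]
          rw [show ("TTAT".toList ++ pvRep4 'T' "TTAT".toList (pvRep4 'A' "AATA".toList rest'))
                = 'T'::'T'::'A'::'T':: pvRep4 'T' "TTAT".toList (pvRep4 'A' "AATA".toList rest')
              from rfl]
          rw [pvRep4_cons_ne 'C' _ (by decide), pvRep4_cons_ne 'C' _ (by decide),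
            pvRep4_cons_ne 'C' _ (by decide), pvRep4_cons_ne 'C' _ (by decide)]
          rw [pvRep4_cons_ne 'G' _ (by decide), pvRep4_cons_ne 'G' _ (by decide),
            pvRep4_cons_ne 'G' _ (by decide), pvRep4_cons_ne 'G' _ (by decide)]
          rfl
        · -- CCCC: passes A, T untouched, replaced by CCGC, passes G
          unfold pvComp pvFCTA pvFTA pvFA
          rw [pvRep4_cons_ne 'A' _ (by decide), pvRep4_cons_ne 'A' _ (by decide),
            pvRep4_cons_ne 'A' _ (by decide), pvRep4_cons_ne 'A' _ (by decide)]
          rw [pvRep4_cons_ne 'T' _ (by decide), pvRep4_cons_ne 'T' _ (by decide),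
            pvRep4_cons_ne 'T' _ (by decide), pvRep4_cons_ne 'T' _ (by decide)]
          rw [pvRep4_quad]
          rw [show ("CCGC".toList ++ pvRep4 'C' "CCGC".toList
                  (pvRep4 'T' "TTAT".toList (pvRep4 'A' "AATA".toList rest')))
                = 'C'::'C'::'G'::'C':: pvRep4 'C' "CCGC".toList
                  (pvRep4 'T' "TTAT".toList (pvRep4 'A' "AATA".toList rest')) from rfl]
          rw [pvRep4_cons_ne 'G' _ (by decide), pvRep4_cons_ne 'G' _ (by decide),
            pvRep4_cons2_ne 'G' _ _ (by decide), pvRep4_cons_ne 'G' _ (by decide)]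
          rfl
        · -- GGGG: passes A, T, C untouched, replaced by GGCG
          unfold pvComp pvFCTA pvFTA pvFA
          rw [pvRep4_cons_ne 'A' _ (by decide), pvRep4_cons_ne 'A' _ (by decide),
            pvRep4_cons_ne 'A' _ (by decide), pvRep4_cons_ne 'A' _ (by decide)]
          rw [pvRep4_cons_ne 'T' _ (by decide), pvRep4_cons_ne 'T' _ (by decide),
            pvRep4_cons_ne 'T' _ (by decide), pvRep4_cons_ne 'T' _ (by decide)]
          rw [pvRep4_cons_ne 'C' _ (by decide), pvRep4_cons_ne 'C' _ (by decide),
            pvRep4_cons_ne 'C' _ (by decide), pvRep4_cons_ne 'C' _ (by decide)]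
          rw [pvRep4_quad]
          rfl
      · rw [show pvScan (a :: b :: d :: e :: rest')
              = a :: pvScan (b :: d :: e :: rest') by
            simp only [pvScan]; rw [if_neg hc]]
        rw [← ih _ hlen1]
        by_cases hm : a = 'A' ∨ a = 'T' ∨ a = 'C' ∨ a = 'G'
        · have hbr : ¬(b = a ∧ d = a ∧ e = a) := by tauto
          rcases hm with h1 | h1 | h1 | h1 <;> subst h1
          · unfold pvComp pvFCTA pvFTA pvFA
            rw [pvRep4_break 'A' _ _ hbr]
            rw [pvRep4_cons_ne 'T' _ (by decide), pvRep4_cons_ne 'C' _ (by decide),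
              pvRep4_cons_ne 'G' _ (by decide)]
          · unfold pvComp pvFCTA pvFTA
            rw [pvFA_pass (by decide), pvT_break hbr]
            rw [pvRep4_cons_ne 'C' _ (by decide), pvRep4_cons_ne 'G' _ (by decide)]
          · unfold pvComp pvFCTA
            rw [pvFTA_pass (by decide) (by decide), pvC_break hbr]
            rw [pvRep4_cons_ne 'G' _ (by decide)]
          · unfold pvComp
            rw [pvFCTA_pass (by decide) (by decide) (by decide), pvG_break hbr]
        · push Not at hm
          exact pvComp_pass hm.1 hm.2.1 hm.2.2.1 hm.2.2.2 _

theorem foldl_append_map (dna : List String) (acc : List String) (g : String → String) :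
    dna.foldl (fun dna2 strand => dna2 ++ [g strand]) acc = acc ++ dna.map g := by
  induction dna generalizing acc with
  | nil => simp
  | cons s t ih => simp [ih]

-- one strand: the four chained replaces equal the single scan
theorem strand_eq (s : String) :
    (PySem.Str.replace (PySem.Str.replace (PySem.Str.replace
        (PySem.Str.replace s "AAAA" "AATA") "TTTT" "TTAT") "CCCC" "CCGC") "GGGG" "GGCG")
      = String.ofList (pvScan s.toList) := by
  have key : (PySem.Str.replace (PySem.Str.replace (PySem.Str.replace
        (PySem.Str.replace s "AAAA" "AATA") "TTTT" "TTAT") "CCCC" "CCGC") "GGGG" "GGCG").toList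
      = pvScan s.toList := by
    simp only [PySem.Str.toList_replace]
    rw [show ("AAAA".toList : List Char) = ['A','A','A','A'] from rfl,
      show ("TTTT".toList : List Char) = ['T','T','T','T'] from rfl,
      show ("CCCC".toList : List Char) = ['C','C','C','C'] from rfl,
      show ("GGGG".toList : List Char) = ['G','G','G','G'] from rfl]
    rw [replace_eq_pvRep4, replace_eq_pvRep4, replace_eq_pvRep4, replace_eq_pvRep4]
    exact pvComp_eq_pvScan s.toList.length s.toList le_rfl
  calc (PySem.Str.replace (PySem.Str.replace (PySem.Str.replace
        (PySem.Str.replace s "AAAA" "AATA") "TTTT" "TTAT") "CCCC" "CCGC") "GGGG" "GGCG")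
      = String.ofList ((PySem.Str.replace (PySem.Str.replace (PySem.Str.replace
        (PySem.Str.replace s "AAAA" "AATA") "TTTT" "TTAT") "CCCC" "CCGC") "GGGG" "GGCG").toList) :=
        String.ofList_toList.symm
    _ = String.ofList (pvScan s.toList) := by rw [key]

-- ===== VERDICT (by name: the statement is the Claim_ definition above) =====
theorem wiederholungEntfernung_spec : Claim_equal_wiederholungEntfernung := by
  unfold Claim_equal_wiederholungEntfernung
  intro dna _
  unfold Spec_wiederholungEntfernung wiederholungEntfernung wiederholungEntfernung_alt
  rw [foldl_append_map]
  simp only [List.nil_append]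
  apply List.map_congr_left
  intro s _
  rw [strand_eq]
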